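-- pv_equiv track=rewrite | github.com/chrisgleissner/c64commander | scripts/dump_c64u_config.py | _indent_sequences
-- ===== SOURCE A (Python) =====
-- def _indent_sequences(yaml_text: str) -> str:
--     lines = yaml_text.splitlines()
--     line_count = len(lines)
--     i = 0
--
--     while i < line_count:
--         line = lines[i]
--         if line.strip() == "":
--             i += 1
--             continue
--
--         if line.rstrip().endswith(":"):
--             base_indent = line[: len(line) - len(line.lstrip())]
--             j = i + 1
--             while j < line_count and lines[j].strip() == "":
--                 j += 1
--             if j < line_count and lines[j].lstrip().startswith("- "):
--                 item_indent = lines[j][: len(lines[j]) - len(lines[j].lstrip())]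
--                 if len(item_indent) == len(base_indent):
--                     k = j
--                     while k < line_count:
--                         candidate = lines[k]
--                         if candidate.strip() == "":
--                             break
--                         if not candidate.lstrip().startswith("- "):
--                             break
--                         candidate_indent = candidate[: len(candidate) - len(candidate.lstrip())]
--                         if len(candidate_indent) != len(item_indent):
--                             break
--                         lines[k] = "  " + candidate
--                         k += 1
--                     i = k
--                     continue
--         i += 1
--
--     return "\n".join(lines) + "\n"
-- ===== SOURCE B (Python) =====
-- def _indent_sequences(yaml_text: str) -> str:
--     out = []
--     active = None   # indent width of the "- " block currently being indented
--     pending = None  # indent width of a key line waiting for its first item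
--     for line in yaml_text.splitlines():
--         stripped = line.strip()
--         indent = len(line) - len(line.lstrip())
--         is_item = line.lstrip().startswith("- ")
--         if active is not None:
--             if stripped != "" and is_item and indent == active:
--                 out.append("  " + line)
--                 continue
--             active = None
--         if pending is not None:
--             if stripped == "":
--                 out.append(line)
--                 continue
--             if is_item and indent == pending:
--                 active = pending
--                 pending = None
--                 out.append("  " + line)
--                 continue
--             pending = None
--         out.append(line)
--         if stripped != "" and line.rstrip().endswith(":"):
--             pending = indent
--     return "\n".join(out) + "\n"
-- ===== Notes on version B (the rewrite author's own statement) =====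
-- stated objective: simpler
-- what changed: Replaced A's cursor-jumping outer while loop with two nested inner while loops (blank-skip scan and in-place block mutation, then resetting the cursor) by a single forward pass over the lines that carries an active-block indent and a pending-key indent as state and appends to an output list.
import Mathlib
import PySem

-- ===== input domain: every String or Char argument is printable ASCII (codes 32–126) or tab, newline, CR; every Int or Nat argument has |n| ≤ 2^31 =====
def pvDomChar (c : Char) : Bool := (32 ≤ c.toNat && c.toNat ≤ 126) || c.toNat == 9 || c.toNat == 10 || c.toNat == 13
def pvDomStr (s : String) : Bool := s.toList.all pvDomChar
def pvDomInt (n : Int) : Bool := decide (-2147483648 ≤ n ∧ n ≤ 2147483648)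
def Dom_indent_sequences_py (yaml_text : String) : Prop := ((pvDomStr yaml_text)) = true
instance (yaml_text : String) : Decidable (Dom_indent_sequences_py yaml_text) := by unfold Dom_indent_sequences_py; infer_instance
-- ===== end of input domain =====

-- B rewrites A's cursor-jumping nested while loops as a single forward pass with a small state
-- machine (objective: simpler — one pass, no index arithmetic); equal return value proved below.

-- Shared line predicates (both Python sources compute exactly these subexpressions):
-- line.strip() == ""
def pvBlank (l : String) : Bool := PySem.Str.strip l == ""
-- line.lstrip().startswith("- ")
def pvItem (l : String) : Bool := PySem.Str.startswith (PySem.Str.lstrip l) "- "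
-- len(line) - len(line.lstrip());  A builds the prefix string line[:k] but only ever compares
-- its len(), which is exactly this number (k ≤ len(line)), so the port carries that length.
def pvInd (l : String) : Int := PySem.Str.len l - PySem.Str.len (PySem.Str.lstrip l)
-- line.rstrip().endswith(":")
def pvKey (l : String) : Bool := PySem.Str.endswith (PySem.Str.rstrip l) ":"

-- ===== PORT A =====
-- (Python's local names line/candidate/base_indent/item_indent/r are inlined in the ports.)
-- inner `while j < line_count and lines[j].strip() == "": j += 1`
def aSkip (lines : List String) (j : Nat) : Nat :=
  if j < lines.length ∧ pvBlank (lines.getD j "") = true then aSkip lines (j + 1) else j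
termination_by lines.length - j
decreasing_by omega

-- inner `while k < line_count: … lines[k] = "  " + candidate; k += 1` (returns mutated lines, k)
def aBlock (lines : List String) (k : Nat) (n : Int) : List String × Nat :=
  if k < lines.length then
    if pvBlank (lines.getD k "") then (lines, k)
    else if !(pvItem (lines.getD k "")) then (lines, k)
    else if pvInd (lines.getD k "") != n then (lines, k)
    else aBlock (lines.set k ("  " ++ lines.getD k "")) (k + 1) n
  else (lines, k)
termination_by lines.length - k
decreasing_by simp; omega

-- termination facts for A's outer while loop (i strictly increases each iteration)
theorem aSkip_ge (lines : List String) (j : Nat) : j ≤ aSkip lines j := by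
  unfold aSkip
  split
  · have := aSkip_ge lines (j + 1); omega
  · exact Nat.le_refl j
termination_by lines.length - j
decreasing_by omega

theorem aBlock_ge (lines : List String) (k : Nat) (n : Int) : k ≤ (aBlock lines k n).2 := by
  unfold aBlock
  split
  · split
    · exact Nat.le_refl k
    · split
      · exact Nat.le_refl k
      · split
        · exact Nat.le_refl k
        · have := aBlock_ge (lines.set k ("  " ++ lines.getD k "")) (k + 1) n
          omega
  · exact Nat.le_refl k
termination_by lines.length - k
decreasing_by simp; omega

theorem aBlock_length (lines : List String) (k : Nat) (n : Int) :
    (aBlock lines k n).1.length = lines.length := by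
  unfold aBlock
  split
  · split
    · rfl
    · split
      · rfl
      · split
        · rfl
        · have := aBlock_length (lines.set k ("  " ++ lines.getD k "")) (k + 1) n
          simpa using this
  · rfl
termination_by lines.length - k
decreasing_by simp; omega

-- outer `while i < line_count:` of A
def aLoop (lines : List String) (i : Nat) : List String :=
  if h : i < lines.length then
    if pvBlank (lines.getD i "") then aLoop lines (i + 1)
    else if pvKey (lines.getD i "") then
      if aSkip lines (i + 1) < lines.length ∧
          (pvItem (lines.getD (aSkip lines (i + 1)) "") &&
            (pvInd (lines.getD (aSkip lines (i + 1)) "") == pvInd (lines.getD i ""))) = true then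
        aLoop (aBlock lines (aSkip lines (i + 1)) (pvInd (lines.getD i ""))).1
              (aBlock lines (aSkip lines (i + 1)) (pvInd (lines.getD i ""))).2
      else aLoop lines (i + 1)
    else aLoop lines (i + 1)
  else lines
termination_by lines.length - i
decreasing_by
  · omega
  · have h1 := aSkip_ge lines (i + 1)
    have h2 := aBlock_ge lines (aSkip lines (i + 1)) (pvInd (lines.getD i ""))
    have h3 := aBlock_length lines (aSkip lines (i + 1)) (pvInd (lines.getD i ""))
    omega
  · omega
  · omega

def indent_sequences_py (yaml_text : String) : String :=
  PySem.Str.join "\n" (aLoop (PySem.Str.splitlines yaml_text) 0) ++ "\n"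

-- ===== PORT B =====
-- one forward pass; `active`/`pending` are the two Optional-int state variables of Source B;
-- bStep is the loop body after the active check, bNorm its unconditional tail.
mutual
def bRun : Option Int → Option Int → List String → List String
  | _, _, [] => []
  | some n, pending, l :: ls =>
      if !(pvBlank l) && pvItem l && (pvInd l == n) then ("  " ++ l) :: bRun (some n) pending ls
      else bStep pending l ls
  | none, pending, l :: ls => bStep pending l ls
termination_by _ _ xs => (xs.length, 2)
decreasing_by all_goals simp_wf <;> omega

def bStep : Option Int → String → List String → List String
  | some m, l, ls =>
      if pvBlank l then l :: bRun none (some m) ls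
      else if pvItem l && (pvInd l == m) then ("  " ++ l) :: bRun (some m) none ls
      else bNorm l ls
  | none, l, ls => bNorm l ls
termination_by _ _ ls => (ls.length + 1, 1)
decreasing_by all_goals simp_wf <;> omega

def bNorm (l : String) (ls : List String) : List String :=
  l :: bRun none (if !(pvBlank l) && pvKey l then some (pvInd l) else none) ls
termination_by (ls.length + 1, 0)
decreasing_by all_goals simp_wf <;> omega
end

def indent_sequences_py_alt (yaml_text : String) : String :=
  PySem.Str.join "\n" (bRun none none (PySem.Str.splitlines yaml_text)) ++ "\n"

-- ===== PRECONDITION & SPEC =====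
def Spec_indent_sequences_py (yaml_text : String) (out : String) : Prop := out = indent_sequences_py_alt yaml_text
instance (yaml_text : String) (out : String) : Decidable (Spec_indent_sequences_py yaml_text out) := by unfold Spec_indent_sequences_py; infer_instance

-- ===== CLAIM (what is proved, stated in full; the proofs are below) =====
def Claim_equal_indent_sequences_py : Prop := ∀ (yaml_text : String), Dom_indent_sequences_py yaml_text → Spec_indent_sequences_py yaml_text (indent_sequences_py yaml_text)

-- ===== LEMMAS AND PROOFS =====

theorem aSkip_le_length (lines : List String) (j : Nat) (hj : j ≤ lines.length) :
    aSkip lines j ≤ lines.length := by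
  unfold aSkip
  split
  · exact aSkip_le_length lines (j + 1) (by omega)
  · exact hj
termination_by lines.length - j
decreasing_by omega

theorem aSkip_stop (lines : List String) (j : Nat) (h : aSkip lines j < lines.length) :
    pvBlank (lines.getD (aSkip lines j) "") = false := by
  unfold aSkip at *
  by_cases hc : j < lines.length ∧ pvBlank (lines.getD j "") = true
  · rw [if_pos hc] at h ⊢; exact aSkip_stop lines (j + 1) h
  · rw [if_neg hc] at h ⊢
    cases hb : pvBlank (lines.getD j "") with
    | false => rfl
    | true => exact absurd ⟨h, hb⟩ hc
termination_by lines.length - j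
decreasing_by omega

-- B passes a blank line through unchanged in state (none, p), for either pending state p
theorem bRun_blank (p : Option Int) (l : String) (ls : List String) (h : pvBlank l = true) :
    bRun none p (l :: ls) = l :: bRun none p ls := by
  cases p <;> simp [bRun, bStep, bNorm, h]

-- at a non-blank line that does not start the expected item block, pending resolves to normal
theorem bRun_pending_to_norm (p : Int) (l : String) (ls : List String) (hb : pvBlank l = false)
    (hnm : (pvItem l && (pvInd l == p)) = false) :
    bRun none (some p) (l :: ls) = bRun none none (l :: ls) := by
  simp [bRun, bStep, hb, hnm]

-- at a non-blank matching item line, pending behaves like active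
theorem bRun_pending_match (p : Int) (l : String) (ls : List String) (hb : pvBlank l = false)
    (hm : (pvItem l && (pvInd l == p)) = true) :
    bRun none (some p) (l :: ls) = bRun (some p) none (l :: ls) := by
  simp [bRun, bStep, hb, hm]

-- the blanks A's j-scan skips are passed through by B keeping its state (none, p)
theorem bRun_skip (lines : List String) (p : Option Int) (j : Nat) (hj : j ≤ lines.length) :
    bRun none p (lines.drop j)
      = (lines.drop j).take (aSkip lines j - j) ++ bRun none p (lines.drop (aSkip lines j)) := by
  unfold aSkip
  by_cases hc : j < lines.length ∧ pvBlank (lines.getD j "") = true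
  · rw [if_pos hc]
    have hdrop : lines.drop j = lines.getD j "" :: lines.drop (j + 1) := by
      rw [List.getD_eq_getElem lines "" hc.1]; exact List.drop_eq_getElem_cons hc.1
    have hrec := bRun_skip lines p (j + 1) (by omega)
    have hge := aSkip_ge lines (j + 1)
    rw [hdrop, bRun_blank p _ _ hc.2, hrec]
    have h1 : aSkip lines (j + 1) - j = (aSkip lines (j + 1) - (j + 1)) + 1 := by omega
    rw [h1, List.take_succ_cons, List.cons_append]
  · rw [if_neg hc]
    simp
termination_by lines.length - j
decreasing_by omega

-- in state (active n, none), failing the active test makes B process the line as in (none, none)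
theorem bRun_active_off (n : Int) (l : String) (ls : List String)
    (h : (!(pvBlank l) && pvItem l && (pvInd l == n)) = false) :
    bRun (some n) none (l :: ls) = bRun none none (l :: ls) := by
  simp [bRun, h]

-- A's k-loop (aBlock) against B's active state, with the surrounding list surgery facts
theorem aBlock_spec (d : Nat) (lines : List String) (k : Nat) (n : Int)
    (hd : lines.length - k ≤ d) (hk : k ≤ lines.length) :
    (aBlock lines k n).1.length = lines.length ∧
    (aBlock lines k n).2 ≤ lines.length ∧
    (aBlock lines k n).1.take k = lines.take k ∧
    (aBlock lines k n).1.drop (aBlock lines k n).2 = lines.drop (aBlock lines k n).2 ∧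
    bRun (some n) none (lines.drop k)
      = ((aBlock lines k n).1.drop k).take ((aBlock lines k n).2 - k)
        ++ bRun none none (lines.drop (aBlock lines k n).2) := by
  induction d generalizing lines k with
  | zero =>
    have hk' : k = lines.length := by omega
    subst hk'
    unfold aBlock
    simp [bRun]
  | succ d ih =>
    rcases Nat.eq_or_lt_of_le hk with hk' | hk'
    · have h0 : lines.drop k = [] := List.drop_eq_nil_of_le (by omega)
      unfold aBlock
      rw [if_neg (by omega)]
      simp [h0, bRun]
      omega
    · have hdrop : lines.drop k = lines.getD k "" :: lines.drop (k + 1) := by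
        rw [List.getD_eq_getElem lines "" hk']; exact List.drop_eq_getElem_cons hk'
      set c := lines.getD k "" with hc
      by_cases hbreak : (!(pvBlank c) && pvItem c && (pvInd c == n)) = true
      · -- the line is consumed by the block: A sets lines[k], B prefixes "  "
        have hblank : pvBlank c = false := by
          cases h : pvBlank c
          · rfl
          · simp [h] at hbreak
        have hitem : pvItem c = true := by
          cases h : pvItem c
          · simp [h] at hbreak
          · rfl
        have hind : (pvInd c == n) = true := by
          cases h : (pvInd c == n)
          · simp [h] at hbreak
          · rfl
        have hne : (pvInd c != n) = false := by simp_all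
        have hstep : aBlock lines k n = aBlock (lines.set k ("  " ++ c)) (k + 1) n := by
          conv_lhs => unfold aBlock
          rw [if_pos hk', ← hc]
          simp [hblank, hitem, hne]
        set lines2 := lines.set k ("  " ++ c) with hl2
        have hlen2 : lines2.length = lines.length := by simp [hl2]
        obtain ⟨ihlen, ihle, ihtake, ihdrop, ihrun⟩ := ih lines2 (k + 1) (by omega) (by omega)
        have hge := aBlock_ge lines2 (k + 1) n
        rw [hstep]
        set res := (aBlock lines2 (k + 1) n).1 with hres
        set k' := (aBlock lines2 (k + 1) n).2 with hk2
        have hd21 : lines2.drop (k + 1) = lines.drop (k + 1) := by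
          rw [hl2, List.drop_set]; simp
        have hdk' : lines2.drop k' = lines.drop k' := by
          rw [hl2, List.drop_set, if_pos (by omega)]
        have htk : lines2.take k = lines.take k := by
          rw [hl2, List.take_set, List.set_eq_of_length_le (by simp)]
        have hresk : k < res.length := by omega
        have hresget : res[k]? = some ("  " ++ c) := by
          have e1 : (res.take (k + 1))[k]? = res[k]? := List.getElem?_take_of_lt (by omega)
          have e2 : (lines2.take (k + 1))[k]? = lines2[k]? := List.getElem?_take_of_lt (by omega)
          have e3 : lines2[k]? = some ("  " ++ c) := by
            rw [hl2]; exact List.getElem?_set_self (by omega)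
          rw [← e1, ihtake, e2, e3]
        have hresdrop : res.drop k = ("  " ++ c) :: res.drop (k + 1) := by
          rw [List.drop_eq_getElem_cons hresk]
          rw [List.getElem?_eq_getElem hresk] at hresget
          simp only [Option.some.injEq] at hresget
          rw [hresget]
        refine ⟨by omega, by omega, ?_, ?_, ?_⟩
        · calc res.take k = (res.take (k + 1)).take k := by rw [List.take_take]; simp
            _ = (lines2.take (k + 1)).take k := by rw [ihtake]
            _ = lines2.take k := by rw [List.take_take]; simp
            _ = lines.take k := htk
        · rw [ihdrop, hdk']
        · rw [hdrop]
          have hact : bRun (some n) none (c :: lines.drop (k + 1))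
              = ("  " ++ c) :: bRun (some n) none (lines.drop (k + 1)) := by
            simp [bRun, hblank, hitem, hind]
          rw [hact, ← hd21, ihrun, hdk', hresdrop]
          have h4 : k' - k = (k' - (k + 1)) + 1 := by omega
          rw [h4, List.take_succ_cons, List.cons_append]
      · -- block breaks at this line
        have hstop : aBlock lines k n = (lines, k) := by
          unfold aBlock
          rw [if_pos hk', ← hc]
          cases h1 : pvBlank c with
          | true => simp [h1]
          | false =>
            cases h2 : pvItem c with
            | false => simp [h1, h2]
            | true =>
              have h3 : (pvInd c == n) = false := by
                cases h : (pvInd c == n)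
                · rfl
                · simp [h1, h2, h] at hbreak
              simp [h1, h2, h3, bne]
        have hbreak' : (!(pvBlank c) && pvItem c && (pvInd c == n)) = false := by
          cases h : (!(pvBlank c) && pvItem c && (pvInd c == n))
          · rfl
          · exact absurd h hbreak
        rw [hstop]
        simp only [Nat.sub_self, List.take_zero, List.nil_append]
        refine ⟨trivial, by omega, trivial, trivial, ?_⟩
        rw [hdrop, bRun_active_off n c _ hbreak', ← hdrop]

-- main simulation: A's outer loop from index i equals the untouched prefix plus B's pass
-- in state (none, none) over the remaining lines
theorem aLoop_eq (d : Nat) (lines : List String) (i : Nat) (hd : lines.length - i ≤ d) :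
    aLoop lines i = lines.take i ++ bRun none none (lines.drop i) := by
  induction d generalizing lines i with
  | zero =>
    unfold aLoop
    rw [dif_neg (by omega)]
    rw [List.drop_eq_nil_of_le (by omega), List.take_of_length_le (by omega)]
    simp [bRun]
  | succ d ih =>
    by_cases hi : i < lines.length
    · have hdrop : lines.drop i = lines.getD i "" :: lines.drop (i + 1) := by
        rw [List.getD_eq_getElem lines "" hi]; exact List.drop_eq_getElem_cons hi
      set l := lines.getD i "" with hl
      have htake1 : lines.take (i + 1) = lines.take i ++ [l] := by
        rw [List.take_succ, hl, List.getD_eq_getElem lines "" hi, List.getElem?_eq_getElem hi]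
        rfl
      by_cases hb : pvBlank l = true
      · -- blank line: both sides pass it through
        have hA : aLoop lines i = aLoop lines (i + 1) := by
          conv_lhs => unfold aLoop
          rw [dif_pos hi, ← hl, if_pos hb]
        rw [hA, ih lines (i + 1) (by omega), hdrop, bRun_blank none l _ hb, htake1]
        simp
      · replace hb : pvBlank l = false := by cases h : pvBlank l; rfl; exact absurd h hb
        by_cases hkey : pvKey l = true
        · -- key line: A scans ahead; B sets pending
          set n := pvInd l with hn
          set j := aSkip lines (i + 1) with hj
          have hji : i + 1 ≤ j := hj ▸ aSkip_ge lines (i + 1)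
          have hjlen : j ≤ lines.length := hj ▸ aSkip_le_length lines (i + 1) (by omega)
          have hBpend : bRun none none (lines.drop i)
              = l :: bRun none (some n) (lines.drop (i + 1)) := by
            rw [hdrop]
            simp [bRun, bStep, bNorm, hb, hkey, ← hn]
          have hskip := bRun_skip lines (some n) (i + 1) (by omega)
          by_cases hfire : j < lines.length ∧
              (pvItem (lines.getD j "") && (pvInd (lines.getD j "") == n)) = true
          · -- the indent block fires
            set c := lines.getD j "" with hc
            have hcb : pvBlank c = false := hc ▸ (hj ▸ aSkip_stop lines (i + 1) (hj ▸ hfire.1))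
            have hA : aLoop lines i = aLoop (aBlock lines j n).1 (aBlock lines j n).2 := by
              conv_lhs => unfold aLoop
              rw [dif_pos hi, ← hl, if_neg (by simp [hb]), if_pos hkey, ← hn, ← hj, ← hc,
                if_pos hfire]
            obtain ⟨blen, ble, btake, bdrop, brun⟩ :=
              aBlock_spec lines.length lines j n (by omega) (by omega)
            have hbge := aBlock_ge lines j n
            set res := (aBlock lines j n).1 with hres
            set k' := (aBlock lines j n).2 with hk'
            have hdropj : lines.drop j = c :: lines.drop (j + 1) := by
              rw [hc, List.getD_eq_getElem lines "" hfire.1]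
              exact List.drop_eq_getElem_cons hfire.1
            rw [hA, ih res k' (by omega)]
            rw [hBpend, hskip, ← hj]
            rw [hdropj, bRun_pending_match n c _ hcb hfire.2, ← hdropj, brun, bdrop]
            -- both sides are now concatenations of the same pieces
            have hres_take : res.take k' = lines.take i ++ [l]
                ++ ((lines.drop (i + 1)).take (j - (i + 1)) ++ (res.drop j).take (k' - j)) := by
              have h1 : res.take k' = res.take j ++ (res.drop j).take (k' - j) := by
                have h0 : k' = j + (k' - j) := by omega
                conv_lhs => rw [h0]
                rw [List.take_add]
              have h3 : lines.take j
                  = lines.take (i + 1) ++ (lines.drop (i + 1)).take (j - (i + 1)) := by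
                have h0 : j = (i + 1) + (j - (i + 1)) := by omega
                conv_lhs => rw [h0]
                rw [List.take_add]
              rw [h1, btake, h3, htake1]
              simp
            rw [hres_take]
            simp
          · -- no block: A advances by one; B's pending dissolves into the normal state
            have hA : aLoop lines i = aLoop lines (i + 1) := by
              conv_lhs => unfold aLoop
              rw [dif_pos hi, ← hl, if_neg (by simp [hb]), if_pos hkey, ← hn, ← hj, if_neg hfire]
            have hpend_drop : bRun none (some n) (lines.drop j)
                = bRun none none (lines.drop j) := by
              rcases Nat.eq_or_lt_of_le hjlen with hjl | hjl
              · rw [List.drop_eq_nil_of_le (by omega)]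
                simp [bRun]
              · have hcb : pvBlank (lines.getD j "") = false :=
                  hj ▸ aSkip_stop lines (i + 1) (hj ▸ hjl)
                have hnm : (pvItem (lines.getD j "") && (pvInd (lines.getD j "") == n)) = false := by
                  cases h : (pvItem (lines.getD j "") && (pvInd (lines.getD j "") == n))
                  · rfl
                  · exact absurd ⟨hjl, h⟩ hfire
                have hdropj : lines.drop j = lines.getD j "" :: lines.drop (j + 1) := by
                  rw [List.getD_eq_getElem lines "" hjl]
                  exact List.drop_eq_getElem_cons hjl
                rw [hdropj, bRun_pending_to_norm n _ _ hcb hnm]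
            have hskipn := bRun_skip lines none (i + 1) (by omega)
            rw [hA, ih lines (i + 1) (by omega), hBpend, hskip, ← hj, hpend_drop, htake1,
              ← hskipn]
            simp
        · -- ordinary line: passed through, no pending set
          have hA : aLoop lines i = aLoop lines (i + 1) := by
            conv_lhs => unfold aLoop
            rw [dif_pos hi, ← hl, if_neg (by simp [hb]), if_neg (by simp_all)]
          have hkey' : pvKey l = false := by
            cases h : pvKey l; rfl; exact absurd h hkey
          have hB : bRun none none (lines.drop i) = l :: bRun none none (lines.drop (i + 1)) := by
            rw [hdrop]
            simp [bRun, bStep, bNorm, hb, hkey']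
          rw [hA, ih lines (i + 1) (by omega), hB, htake1]
          simp
    · unfold aLoop
      rw [dif_neg hi]
      rw [List.drop_eq_nil_of_le (by omega), List.take_of_length_le (by omega)]
      simp [bRun]

-- ===== VERDICT (by name: the statement is the Claim_ definition above) =====
theorem indent_sequences_py_spec : Claim_equal_indent_sequences_py := by
  intro yaml_text _
  unfold Spec_indent_sequences_py indent_sequences_py indent_sequences_py_alt
  rw [aLoop_eq (PySem.Str.splitlines yaml_text).length (PySem.Str.splitlines yaml_text) 0
    (by omega)]
  simp
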